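-- pv_equiv track=rewrite | github.com/williamagyapong/dissertation-code | simulation/utils.py | generate_groupings
-- ===== SOURCE A (Python) =====
-- def generate_groupings(p, exclude_indices=None):
--     """
--     Generate groupings of variables based on the number of variables p.
--     The groupings are based on the divisors of p, excluding 1 and p itself.
--     Args:
--         p: Number of variables.
--         exclude_indices (list of int): Indices of sublists to exclude.
--     Returns:
--         A list of lists, where each inner list represents a grouping of variables.
--     """
--     # Get all divisors of p that are >= 2 and < p
--     divisors = [i for i in range(2, p) if p % i == 0]
--
--     # Generate list of groupings based on divisors
--     groupings = []
--     for divisor in divisors: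
--         num_groups = p // divisor  # Number of groups
--         group_size = divisor  # Size of each group
--         grouping = [group_size] * num_groups
--         groupings.append(grouping)
--     if exclude_indices is not None:
--         groupings = [sublist for i, sublist in enumerate(groupings) if i not in exclude_indices]
--     return groupings
-- ===== SOURCE B (Python) =====
-- def generate_groupings(p, exclude_indices=None):
--     # Divisor-pair sweep: collect divisors 2 <= d with d*d <= p, pair each
--     # with its cofactor p//d; this yields all divisors of p in (1, p) in
--     # ascending order in O(sqrt(p)) instead of O(p).
--     small = []
--     large = []
--     d = 2
--     while d * d <= p:
--         if p % d == 0: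
--             small.append(d)
--             q = p // d
--             if q != d:
--                 large.append(q)
--         d += 1
--     divisors = small + large[::-1]
--     groupings = [[d] * (p // d) for d in divisors]
--     if exclude_indices is not None:
--         ex = set(exclude_indices)
--         groupings = [g for i, g in enumerate(groupings) if i not in ex]
--     return groupings
-- ===== Notes on version B (the rewrite author's own statement) =====
-- stated objective: faster
-- what changed: Replaces A's O(p) scan of range(2,p) for divisors by a sqrt(p) divisor-pair sweep (collect d and cofactor p//d for d*d<=p, concatenate with the reversed cofactors), then builds the groupings by a direct map.
import Mathlib
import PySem

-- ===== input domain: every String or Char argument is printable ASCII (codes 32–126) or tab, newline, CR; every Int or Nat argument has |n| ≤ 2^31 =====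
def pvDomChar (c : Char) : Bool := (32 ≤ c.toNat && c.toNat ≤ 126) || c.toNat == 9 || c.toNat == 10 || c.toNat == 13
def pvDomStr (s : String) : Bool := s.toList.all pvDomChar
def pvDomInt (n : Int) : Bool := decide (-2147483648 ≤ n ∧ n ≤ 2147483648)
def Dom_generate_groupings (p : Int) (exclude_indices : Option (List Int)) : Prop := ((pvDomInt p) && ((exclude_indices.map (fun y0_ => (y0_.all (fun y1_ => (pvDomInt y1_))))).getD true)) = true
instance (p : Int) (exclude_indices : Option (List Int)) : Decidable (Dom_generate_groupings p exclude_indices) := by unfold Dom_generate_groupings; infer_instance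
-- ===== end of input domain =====

-- B replaces A's O(p) scan of range(2,p) for divisors by a √p divisor-pair sweep
-- (collect d and cofactor p//d for d*d ≤ p, append the reversed cofactors), then maps
-- each divisor to its grouping directly; objective: faster (asymptotic).


-- ===== PORT A =====
def generate_groupings (p : Int) (exclude_indices : Option (List Int)) : List (List Int) :=
  -- divisors = [i for i in range(2, p) if p % i == 0]
  let divisors := (PySem.List.pyRange 2 p 1).filter (fun i => PySem.Int.mod p i == 0)
  -- for divisor in divisors: groupings.append([group_size] * num_groups)
  let groupings := divisors.foldl (fun acc divisor =>
    let num_groups := PySem.Int.floordiv p divisor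
    let group_size := divisor
    acc ++ [List.replicate num_groups.toNat group_size]) []
  match exclude_indices with
  | none => groupings
  | some ex =>
      (PySem.List.enumerate groupings).filterMap
        (fun iv => if iv.1 ∈ ex then none else some iv.2)

-- ===== PORT B =====
-- the while loop of Source B: d runs from 2 while d*d <= p, collecting small divisors
-- and their cofactors (the hypothesis 2 ≤ d is carried only for termination)
def ggLoop (p d : Int) (small large : List Int) (hd : 2 ≤ d) : List Int × List Int :=
  if h : d * d ≤ p then
    if PySem.Int.mod p d == 0 then
      let q := PySem.Int.floordiv p d
      if q ≠ d then ggLoop p (d + 1) (small ++ [d]) (large ++ [q]) (by omega)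
      else ggLoop p (d + 1) (small ++ [d]) large (by omega)
    else ggLoop p (d + 1) small large (by omega)
  else (small, large)
termination_by (p + 1 - d).toNat
decreasing_by all_goals (have hdd : d ≤ d * d := le_mul_of_one_le_left (by omega) (by omega); omega)

def generate_groupings_alt (p : Int) (exclude_indices : Option (List Int)) : List (List Int) :=
  let sl := ggLoop p 2 [] [] (by omega)
  let divisors := sl.1 ++ sl.2.reverse
  let groupings := divisors.map (fun d => List.replicate (PySem.Int.floordiv p d).toNat d)
  match exclude_indices with
  | none => groupings
  | some exl =>
      let ex := PySem.Set.ofList exl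
      (PySem.List.enumerate groupings).filterMap
        (fun iv => if PySem.Set.contains ex iv.1 then none else some iv.2)

-- ===== PRECONDITION & SPEC =====
def Spec_generate_groupings (p : Int) (exclude_indices : Option (List Int)) (out : List (List Int)) : Prop := out = generate_groupings_alt p exclude_indices
instance (p : Int) (exclude_indices : Option (List Int)) (out : List (List Int)) : Decidable (Spec_generate_groupings p exclude_indices out) := by unfold Spec_generate_groupings; infer_instance

-- ===== CLAIM (what is proved, stated in full; the proofs are below) =====
def Claim_equal_generate_groupings : Prop := ∀ (p : Int) (exclude_indices : Option (List Int)), Dom_generate_groupings p exclude_indices → Spec_generate_groupings p exclude_indices (generate_groupings p exclude_indices)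

-- ===== LEMMAS AND PROOFS =====

-- the small-divisor list the loop produces, in isolation (proof-only helper)
def smalls (p d : Int) (hd : 2 ≤ d) : List Int :=
  if h : d * d ≤ p then
    (if PySem.Int.mod p d == 0 then [d] else []) ++ smalls p (d + 1) (by omega)
  else []
termination_by (p + 1 - d).toNat
decreasing_by all_goals (have hdd : d ≤ d * d := le_mul_of_one_le_left (by omega) (by omega); omega)

def cof (p : Int) : Int → Option Int :=
  fun x => if PySem.Int.floordiv p x ≠ x then some (PySem.Int.floordiv p x) else none

theorem ggLoop_eq (p d : Int) (small large : List Int) (hd : 2 ≤ d) :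
    ggLoop p d small large hd =
      (small ++ smalls p d hd, large ++ (smalls p d hd).filterMap (cof p)) := by
  fun_induction ggLoop with
  | case1 p d small large hd h hm hq ih =>
      rw [smalls]
      simp [*, cof, List.filterMap_cons]
      rw [if_neg hq]
  | case2 p d small large hd h hm hq ih =>
      simp only [not_not] at hq
      rw [smalls]
      simp [*, cof, List.filterMap_cons]
      rw [if_pos hq]
  | case3 p d small large hd h ih =>
      rw [smalls]
      simp [*]
  | case4 p d small large hd =>
      rw [smalls]
      simp [*]

theorem mem_smalls {p d x : Int} (hd : 2 ≤ d) :
    x ∈ smalls p d hd ↔ d ≤ x ∧ x * x ≤ p ∧ x ∣ p := by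
  fun_induction smalls with
  | case1 d hd h ih =>
      rw [List.mem_append, ih]
      constructor
      · rintro (hx | ⟨h1, h2, h3⟩)
        · have hx' : x = d := by
            by_cases hm : (PySem.Int.mod p d == 0) = true <;> simp [hm] at hx
            exact hx
          subst hx'
          refine ⟨le_refl _, h, ?_⟩
          have hm : (PySem.Int.mod p x == 0) = true := by
            by_cases hm : (PySem.Int.mod p x == 0) = true <;> simp [hm] at hx ⊢
          simp only [beq_iff_eq] at hm
          exact (PySem.Int.mod_eq_zero_iff_dvd p x).mp hm
        · exact ⟨by omega, h2, h3⟩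
      · rintro ⟨h1, h2, h3⟩
        by_cases hx : x = d
        · subst hx
          left
          have : PySem.Int.mod p x = 0 := (PySem.Int.mod_eq_zero_iff_dvd p x).mpr h3
          simp [this]
        · right; exact ⟨by omega, h2, h3⟩
  | case2 d hd h =>
      simp only [List.not_mem_nil, false_iff]
      rintro ⟨h1, h2, h3⟩
      have : d * d ≤ x * x := by nlinarith
      omega

theorem pairwise_smalls (p d : Int) (hd : 2 ≤ d) : (smalls p d hd).Pairwise (· < ·) := by
  fun_induction smalls with
  | case1 d hd h ih =>
      apply List.pairwise_append.mpr
      refine ⟨?_, ih, ?_⟩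
      · by_cases hm : (PySem.Int.mod p d == 0) = true <;> simp [hm]
      · intro a ha b hb
        have hb' := (mem_smalls (by omega)).mp hb
        have ha' : a = d := by
          by_cases hm : (PySem.Int.mod p d == 0) = true <;> simp [hm] at ha
          exact ha
        omega
  | case2 d hd h => exact List.Pairwise.nil

theorem cof_divisor {p x q : Int} (hx2 : 2 ≤ x) (hxx : x * x ≤ p) (hdvd : x ∣ p)
    (hq : cof p x = some q) : 2 ≤ q ∧ q < p ∧ p < q * q ∧ q ∣ p ∧ x * q = p ∧ x < q := by
  obtain ⟨c, hc⟩ := hdvd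
  have hp0 : 0 < p := by nlinarith
  have hfd : PySem.Int.floordiv p x = c := by
    rw [PySem.Int.floordiv_eq_ediv_of_pos (by omega), hc, Int.mul_ediv_cancel_left _ (by omega)]
  simp only [cof, hfd] at hq
  by_cases hne : c = x
  · simp [hne] at hq
  · simp [hne] at hq
    subst hq
    have hcx : x ≤ c := by nlinarith
    have hxc : x < c := by omega
    refine ⟨by omega, by nlinarith, by nlinarith, ⟨x, by linarith [hc]⟩, by omega, hxc⟩

theorem mem_larges {p q : Int} :
    q ∈ (smalls p 2 (by omega)).filterMap (cof p) ↔ 2 ≤ q ∧ q < p ∧ p < q * q ∧ q ∣ p := by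
  rw [List.mem_filterMap]
  constructor
  · rintro ⟨x, hx, hq⟩
    obtain ⟨h1, h2, h3⟩ := (mem_smalls (by omega)).mp hx
    obtain ⟨a, b, c, d, _, _⟩ := cof_divisor h1 h2 h3 hq
    exact ⟨a, b, c, d⟩
  · rintro ⟨h1, h2, h3, h4⟩
    obtain ⟨x, hx⟩ := h4
    have hp0 : 0 < p := by omega
    have hx1 : 1 ≤ x := by nlinarith
    have hx2 : 2 ≤ x := by
      rcases lt_or_ge x 2 with h | h
      · have : x = 1 := by omega
        simp [this] at hx; omega
      · exact h
    have hxq : x < q := by nlinarith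
    refine ⟨x, (mem_smalls (by omega)).mpr ⟨hx2, by nlinarith, ⟨q, by linarith [hx]⟩⟩, ?_⟩
    have hfd : PySem.Int.floordiv p x = q := by
      rw [PySem.Int.floordiv_eq_ediv_of_pos (by omega), hx, Int.mul_ediv_cancel _ (by omega)]
    simp [cof, hfd]
    omega

theorem pairwise_larges (p : Int) :
    ((smalls p 2 (by omega)).filterMap (cof p)).Pairwise (· > ·) := by
  have h := List.Pairwise.and_mem.mp (pairwise_smalls p 2 (by omega))
  rw [List.pairwise_filterMap]
  refine h.imp ?_
  rintro a b ⟨ha, hb, hab⟩ x hx y hy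
  obtain ⟨ha1, ha2, ha3⟩ := (mem_smalls (by omega)).mp ha
  obtain ⟨hb1, hb2, hb3⟩ := (mem_smalls (by omega)).mp hb
  obtain ⟨_, _, _, _, hxa, _⟩ := cof_divisor ha1 ha2 ha3 hx
  obtain ⟨_, _, _, _, hyb, _⟩ := cof_divisor hb1 hb2 hb3 hy
  nlinarith

theorem divisors_eq (p : Int) :
    (PySem.List.pyRange 2 p 1).filter (fun i => PySem.Int.mod p i == 0) =
      smalls p 2 (by omega) ++ ((smalls p 2 (by omega)).filterMap (cof p)).reverse := by
  have memL : ∀ x : Int, x ∈ (PySem.List.pyRange 2 p 1).filter (fun i => PySem.Int.mod p i == 0) ↔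
      2 ≤ x ∧ x < p ∧ x ∣ p := by
    intro x
    simp [List.mem_filter, PySem.List.mem_pyRange_one, PySem.Int.mod_eq_zero_iff_dvd]
    tauto
  have pairL : ((PySem.List.pyRange 2 p 1).filter (fun i => PySem.Int.mod p i == 0)).Pairwise (· < ·) :=
    (PySem.List.pairwise_lt_pyRange_one 2 p).filter _
  have pairR : (smalls p 2 (by omega) ++ ((smalls p 2 (by omega)).filterMap (cof p)).reverse).Pairwise
      ((· < ·) : Int → Int → Prop) := by
    apply List.pairwise_append.mpr
    refine ⟨pairwise_smalls p 2 (by omega), ?_, ?_⟩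
    · exact List.pairwise_reverse.mpr (pairwise_larges p)
    · intro a ha b hb
      rw [List.mem_reverse] at hb
      obtain ⟨ha1, ha2, _⟩ := (mem_smalls (by omega)).mp ha
      obtain ⟨hb1, _, hb3, _⟩ := mem_larges.mp hb
      nlinarith
  have memR : ∀ x : Int, x ∈ smalls p 2 (by omega) ++ ((smalls p 2 (by omega)).filterMap (cof p)).reverse ↔
      2 ≤ x ∧ x < p ∧ x ∣ p := by
    intro x
    rw [List.mem_append, List.mem_reverse, mem_smalls (by omega), mem_larges]
    constructor
    · rintro (⟨h1, h2, h3⟩ | ⟨h1, h2, h3, h4⟩)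
      · exact ⟨h1, by nlinarith, h3⟩
      · exact ⟨h1, h2, h4⟩
    · rintro ⟨h1, h2, h3⟩
      rcases lt_or_ge p (x * x) with h | h
      · exact Or.inr ⟨h1, h2, h, h3⟩
      · exact Or.inl ⟨h1, h, h3⟩
  have hperm : (smalls p 2 (by omega) ++ ((smalls p 2 (by omega)).filterMap (cof p)).reverse).Perm
      ((PySem.List.pyRange 2 p 1).filter (fun i => PySem.Int.mod p i == 0)) := by
    apply (List.perm_ext_iff_of_nodup (pairR.imp ne_of_lt) (pairL.imp ne_of_lt)).mpr
    intro x
    rw [memL, memR]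
  have e1 := PySem.List.sorted_eq_of_perm_of_pairwise_lt _ _ (fun x : Int => x) (List.Perm.refl _) pairL
  have e2 := PySem.List.sorted_eq_of_perm_of_pairwise_lt _ _ (fun x : Int => x) hperm pairR
  exact e1.symm.trans e2

-- ===== VERDICT (by name: the statement is the Claim_ definition above) =====
theorem generate_groupings_spec : Claim_equal_generate_groupings := by
  intro p ex _
  unfold Spec_generate_groupings generate_groupings generate_groupings_alt
  cases ex with
  | none =>
      dsimp only
      rw [ggLoop_eq]
      simp only [List.nil_append, PySem.List.foldl_append_singleton_eq_map, divisors_eq p]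
  | some exl =>
      dsimp only
      rw [ggLoop_eq]
      simp only [List.nil_append, PySem.List.foldl_append_singleton_eq_map, divisors_eq p]
      have hfun : ∀ iv : Int × List Int,
          (if iv.1 ∈ exl then (none : Option (List Int)) else some iv.2) =
          (if PySem.Set.contains (PySem.Set.ofList exl) iv.1 = true then none else some iv.2) := by
        intro iv
        by_cases h : iv.1 ∈ exl
        · rw [if_pos h, if_pos (by rw [PySem.Set.contains_iff, PySem.Set.mem_ofList]; exact h)]
        · rw [if_neg h, if_neg (by rw [PySem.Set.contains_iff]; simp [PySem.Set.mem_ofList, h])]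
      simp only [hfun]
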